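-- pv_equiv track=rewrite | github.com/HzCeee/Algorithms | LeetCode/DFS/802_FindEventualSafeStates.py | eventualSafeNodes
-- ===== SOURCE A (Python) =====
-- def eventualSafeNodes(graph):
--     """
--     :type graph: List[List[int]]
--     :rtype: List[int]
--     """
--     outNodes = {}
--     for node, outEdge in enumerate(graph):
--         outNodes[node] = outEdge
--
--     memo = {}
--
--     # return bool value if the node is eventually safe
--     def eventualSafeNodesHelper(node, visitedNodes):
--         if node in memo: return memo[node]
--         if node in visitedNodes: return False
--
--         visitedNodes.add(node)
--
--         if not outNodes[node]:
--             memo[node] = True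
--             return True
--
--         for outNode in outNodes[node]:
--             if not eventualSafeNodesHelper(outNode, visitedNodes):
--                 memo[node] = False
--                 return False
--
--         memo[node] = True
--         return True
--
--     ans = sorted([i for i in range(len(graph)) if eventualSafeNodesHelper(i, set())])
--     return ans
-- ===== SOURCE B (Python) =====
-- def eventualSafeNodes(graph):
--     """
--     :type graph: List[List[int]]
--     :rtype: List[int]
--     """
--     n = len(graph)
--     safe = [False] * n
--     changed = True
--     while changed:
--         changed = False
--         for v in range(n):
--             if not safe[v] and all(safe[w] for w in graph[v]):
--                 safe[v] = True
--                 changed = True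
--     return [v for v in range(n) if safe[v]]
-- ===== Notes on version B (the rewrite author's own statement) =====
-- stated objective: simpler
-- what changed: Replaces the memoized recursive DFS with cycle detection (shared memo dict, per-start visited set, nested helper) by an iterative fixpoint: repeatedly sweep all nodes and mark a node safe once all its successors are marked safe, until a sweep changes nothing.
import Mathlib
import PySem

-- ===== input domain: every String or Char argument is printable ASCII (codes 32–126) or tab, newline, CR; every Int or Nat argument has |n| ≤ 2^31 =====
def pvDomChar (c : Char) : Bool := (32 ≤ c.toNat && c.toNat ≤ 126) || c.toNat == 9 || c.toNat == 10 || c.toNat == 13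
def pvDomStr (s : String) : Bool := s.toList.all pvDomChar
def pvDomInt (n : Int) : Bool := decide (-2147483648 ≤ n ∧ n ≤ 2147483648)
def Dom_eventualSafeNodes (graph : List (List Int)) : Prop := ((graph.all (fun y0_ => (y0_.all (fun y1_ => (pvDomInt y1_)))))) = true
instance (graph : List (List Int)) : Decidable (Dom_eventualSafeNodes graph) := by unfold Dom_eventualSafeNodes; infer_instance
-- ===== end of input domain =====

-- B replaces A's memoized recursive DFS by an iterative fixpoint sweep ("mark a node safe
-- once all its successors are safe, repeat until stable"): shorter and plainer (objective:
-- simpler; not faster). Equivalence of the return values is proved on Pre_ below.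

-- ===== PORT A =====
-- outNodes dict: node ↦ its edge list; memo/visited threaded explicitly (Python mutates them).
-- The recursion carries fuel purely as a totality guard (Python's recursion is unbounded);
-- fuel n+1 is never exhausted under Pre_ (proved below).  'none' = KeyError / fuel out.
mutual
def esnHelper (outN : PySem.Dict Int (List Int)) :
    Nat → Int → PySem.Set Int → PySem.Dict Int Bool →
    Option (Bool × PySem.Set Int × PySem.Dict Int Bool)
  | 0, _, _, _ => none
  | fuel+1, node, visited, memo =>
    match memo.get? node with
    | some b => some (b, visited, memo)                      -- if node in memo: return memo[node]
    | none =>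
      if PySem.Set.contains visited node then some (false, visited, memo)   -- if node in visitedNodes: return False
      else
        let visited' := PySem.Set.add visited node           -- visitedNodes.add(node)
        match outN.get? node with
        | none => none                                       -- KeyError (outside Pre_)
        | some outs =>
          if outs.isEmpty then some (true, visited', memo.insert node true)  -- if not outNodes[node]
          else esnLoop outN fuel node outs visited' memo
termination_by fuel _ _ _ => (fuel, 0, 0)

def esnLoop (outN : PySem.Dict Int (List Int)) :
    Nat → Int → List Int → PySem.Set Int → PySem.Dict Int Bool →
    Option (Bool × PySem.Set Int × PySem.Dict Int Bool)
  | _, node, [], visited, memo => some (true, visited, memo.insert node true)  -- loop done: memo True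
  | fuel, node, w :: ws, visited, memo =>
    match esnHelper outN fuel w visited memo with
    | none => none
    | some (b, visited', memo') =>
      if b then esnLoop outN fuel node ws visited' memo'
      else some (false, visited', memo'.insert node false)   -- memo[node] = False; return False
termination_by fuel _ outs _ _ => (fuel, 1, outs.length)
end

def eventualSafeNodes (graph : List (List Int)) : List Int :=
  let outN : PySem.Dict Int (List Int) :=
    (PySem.List.enumerate graph).foldl (fun d p => d.insert p.1 p.2) PySem.Dict.empty
  let n : Nat := graph.length
  let st := (PySem.List.pyRange 0 (n : Int) 1).foldl
    (fun (st : List Int × PySem.Dict Int Bool) i =>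
      match esnHelper outN (n+1) i PySem.Set.empty st.2 with
      | none => st                                           -- unreachable under Pre_
      | some (b, _, memo') => (if b then st.1 ++ [i] else st.1, memo'))
    ([], PySem.Dict.empty)
  PySem.List.sorted st.1 (fun x => x) false

-- ===== PORT B =====
-- all(safe[w] for w in outs); 'none' from an out-of-range index (a Python IndexError,
-- outside Pre_) is read as false here — unclaimed territory.
def esnAll (safe : List Bool) : List Int → Bool
  | [] => true
  | w :: ws =>
    match PySem.List.pyGet? safe w with
    | none => false
    | some b => b && esnAll safe ws

-- one 'for v in range(n)' sweep; state = (safe, changed)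
def esnSweep (graph : List (List Int)) (n : Nat) (safe0 : List Bool) : List Bool × Bool :=
  (PySem.List.pyRange 0 (n : Int) 1).foldl
    (fun (st : List Bool × Bool) v =>
      if PySem.List.pyGetD st.1 v false = false ∧ esnAll st.1 (PySem.List.pyGetD graph v []) = true then
        (PySem.List.pySetD st.1 v true, true)
      else st)
    (safe0, false)

-- 'while changed' with fuel as totality guard; n+1 sweeps always reach the fixpoint
def esnIter (graph : List (List Int)) (n : Nat) : Nat → List Bool → List Bool
  | 0, safe => safe
  | f+1, safe =>
    let sw := esnSweep graph n safe
    if sw.2 then esnIter graph n f sw.1 else sw.1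

def eventualSafeNodes_alt (graph : List (List Int)) : List Int :=
  let n := graph.length
  let safe := esnIter graph n (n+1) (List.replicate n false)
  (PySem.List.pyRange 0 (n : Int) 1).foldl
    (fun acc v => if PySem.List.pyGetD safe v false then acc ++ [v] else acc) []

-- ===== PRECONDITION & SPEC =====
-- Semantic helpers for Pre_ (not used by either port): esnSucc is the successor list of a
-- node, and safeAtB g k v decides rank-k eventual safety (every path out of v dies out
-- within k steps); rank g.length+2 is eventual safety itself (proved below: safe_bound).
def esnSucc (g : List (List Int)) (v : Int) : List Int := g.getD v.toNat []

def safeAtB (g : List (List Int)) : Nat → Int → Bool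
  | 0, _ => false
  | k+1, v => (esnSucc g v).all (fun w => safeAtB g k w)

-- Pre_ admits exactly the graphs on which A returns: an edge target outside
-- range(len(graph)) makes A raise KeyError when examined, and it is examined unless an
-- earlier successor of the same node is not eventually safe (both programs stop scanning
-- a successor list at the first unsafe entry, so such a bad edge is never read).
def Pre_eventualSafeNodes (graph : List (List Int)) : Prop :=
  ∀ t : Nat, t < graph.length →
    ∀ j : Nat, j < (graph.getD t []).length →
      ¬(0 ≤ (graph.getD t []).getD j 0 ∧ (graph.getD t []).getD j 0 < (graph.length : Int)) →
      ∃ i : Nat, i < j ∧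
        (0 ≤ (graph.getD t []).getD i 0 ∧ (graph.getD t []).getD i 0 < (graph.length : Int)) ∧
        safeAtB graph (graph.length + 2) ((graph.getD t []).getD i 0) = false
instance (graph : List (List Int)) : Decidable (Pre_eventualSafeNodes graph) := by
  unfold Pre_eventualSafeNodes; infer_instance

def pvWitness_eventualSafeNodes : List (List Int) := [[1], [2, 0], []]

def Spec_eventualSafeNodes (graph : List (List Int)) (out : List Int) : Prop := out = eventualSafeNodes_alt graph
instance (graph : List (List Int)) (out : List Int) : Decidable (Spec_eventualSafeNodes graph out) := by unfold Spec_eventualSafeNodes; infer_instance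

-- ===== CLAIM (what is proved, stated in full; the proofs are below) =====
def Claim_equal_eventualSafeNodes : Prop := ∀ (graph : List (List Int)), Dom_eventualSafeNodes graph → Pre_eventualSafeNodes graph → Spec_eventualSafeNodes graph (eventualSafeNodes graph)

-- ===== LEMMAS AND PROOFS =====
-- Semantic layer: rank-based safety
def SafeAt (g : List (List Int)) : Nat → Int → Prop
  | 0, _ => False
  | k+1, v => ∀ w ∈ esnSucc g v, SafeAt g k w

def Safe (g : List (List Int)) (v : Int) : Prop := ∃ k, SafeAt g k v

def EsnStep (g : List (List Int)) (a b : Int) : Prop := b ∈ esnSucc g a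

theorem safeAt_mono {g : List (List Int)} : ∀ {k K : Nat}, k ≤ K → ∀ {v : Int}, SafeAt g k v → SafeAt g K v := by
  intro k
  induction k with
  | zero => intro K _ v h; exact h.elim
  | succ j ih =>
    intro K hK v h
    match K, hK with
    | K+1, hK =>
      intro w hw
      exact ih (Nat.succ_le_succ_iff.mp hK) (h w hw)

theorem safe_succ {g : List (List Int)} {v w : Int} (h : Safe g v) (hw : w ∈ esnSucc g v) : Safe g w := by
  obtain ⟨k, hk⟩ := h
  match k, hk with
  | k+1, hk => exact ⟨k, hk w hw⟩

theorem safe_of_forall_succ {g : List (List Int)} {v : Int} (h : ∀ w ∈ esnSucc g v, Safe g w) : Safe g v := by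
  have : ∀ l : List Int, (∀ w ∈ l, Safe g w) → ∃ K, ∀ w ∈ l, SafeAt g K w := by
    intro l
    induction l with
    | nil => intro _; exact ⟨0, by simp⟩
    | cons x t ih =>
      intro hl
      obtain ⟨K, hK⟩ := ih (fun w hw => hl w (by simp [hw]))
      obtain ⟨k, hk⟩ := hl x (by simp)
      refine ⟨max k K, ?_⟩
      intro w hw
      rcases List.mem_cons.mp hw with h | h
      · exact h ▸ safeAt_mono (Nat.le_max_left _ _) hk
      · exact safeAt_mono (Nat.le_max_right _ _) (hK w h)
  obtain ⟨K, hK⟩ := this _ h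
  exact ⟨K+1, fun w hw => hK w hw⟩

theorem not_safe_of_cycle {g : List (List Int)} {v : Int}
    (h : Relation.TransGen (EsnStep g) v v) : ¬ Safe g v := by
  rintro ⟨k, hk⟩
  induction k using Nat.strong_induction_on generalizing v with
  | _ k ih =>
    match k, hk with
    | k+1, hk =>
      obtain ⟨w, hvw, hwv⟩ := Relation.TransGen.head'_iff.mp h
      exact ih k (by omega) (Relation.TransGen.tail' hwv hvw) (hk w hvw)

theorem safeAtB_iff {g : List (List Int)} : ∀ {k : Nat} {v : Int}, safeAtB g k v = true ↔ SafeAt g k v := by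
  intro k
  induction k with
  | zero => intro v; simp [safeAtB, SafeAt]
  | succ k ih =>
    intro v
    simp only [safeAtB, SafeAt, List.all_eq_true]
    constructor
    · intro h w hw; exact ih.mp (h w hw)
    · intro h w hw; exact ih.mpr (h w hw)

theorem esnSucc_toNat (g : List (List Int)) (v : Int) :
    esnSucc g ((v.toNat : Nat) : Int) = esnSucc g v := by
  unfold esnSucc
  rw [Int.toNat_natCast]

theorem safeAt_congr {g : List (List Int)} : ∀ {k : Nat} {a b : Int},
    esnSucc g a = esnSucc g b → (SafeAt g k a ↔ SafeAt g k b) := by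
  intro k
  cases k with
  | zero => intro a b _; exact Iff.rfl
  | succ k => intro a b h; simp only [SafeAt]; rw [h]

theorem esnSucc_junk {g : List (List Int)} {v : Int} (h : g.length ≤ v.toNat) :
    esnSucc g v = [] := by
  simp [esnSucc, List.getD_eq_getElem?_getD, List.getElem?_eq_none h]

theorem safeAt_junk {g : List (List Int)} {v : Int} (h : g.length ≤ v.toNat) :
    ∀ {k : Nat}, 1 ≤ k → SafeAt g k v := by
  intro k hk
  match k, hk with
  | k+1, _ =>
    intro w hw
    rw [esnSucc_junk h] at hw
    cases hw

-- stabilization: the chain of rank-k safe sets over the n nodes collapses by rank n+2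
def SetAt (g : List (List Int)) (k : Nat) : Finset Nat :=
  (Finset.range g.length).filter (fun j => safeAtB g k ((j : Nat) : Int) = true)

theorem mem_setAt {g : List (List Int)} {k : Nat} {j : Nat} :
    j ∈ SetAt g k ↔ (j < g.length ∧ SafeAt g k ((j : Nat) : Int)) := by
  simp [SetAt, Finset.mem_filter, Finset.mem_range, safeAtB_iff]

theorem setAt_mono (g : List (List Int)) (k : Nat) : SetAt g k ⊆ SetAt g (k+1) := by
  intro j hj
  rw [mem_setAt] at *
  exact ⟨hj.1, safeAt_mono (Nat.le_succ k) hj.2⟩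

theorem step_down {g : List (List Int)} {k : Nat} (hk : 1 ≤ k)
    (hsub : SetAt g (k+1) ⊆ SetAt g k) :
    ∀ v : Int, SafeAt g (k+2) v → SafeAt g (k+1) v := by
  intro v hv w hw
  have hw1 : SafeAt g (k+1) w := hv w hw
  by_cases hwr : w.toNat < g.length
  · have h1 : w.toNat ∈ SetAt g (k+1) :=
      mem_setAt.mpr ⟨hwr, (safeAt_congr (esnSucc_toNat g w)).mpr hw1⟩
    have h2 := mem_setAt.mp (hsub h1)
    exact (safeAt_congr (esnSucc_toNat g w)).mp h2.2
  · exact safeAt_junk (by omega) hk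

theorem collapse {g : List (List Int)} {k0 : Nat} (hk0 : 1 ≤ k0)
    (hsub : SetAt g (k0+1) ⊆ SetAt g k0) :
    ∀ (j : Nat) (v : Int), SafeAt g (k0+1+j) v → SafeAt g (k0+1) v := by
  intro j
  induction j with
  | zero => intro v hv; exact hv
  | succ j ihj =>
    intro v hv
    apply step_down hk0 hsub
    intro w hw
    exact ihj w (hv w hw)

theorem exists_collapse (g : List (List Int)) :
    ∃ k0 : Nat, 1 ≤ k0 ∧ k0 ≤ g.length + 1 ∧ SetAt g (k0+1) ⊆ SetAt g k0 := by
  by_contra h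
  push_neg at h
  have hstrict : ∀ k0 : Nat, 1 ≤ k0 → k0 ≤ g.length + 1 →
      (SetAt g k0).card < (SetAt g (k0+1)).card := by
    intro k0 h1 h2
    have hne : SetAt g k0 ≠ SetAt g (k0+1) := by
      intro he
      exact h k0 h1 h2 (by rw [← he])
    exact Finset.card_lt_card (Finset.ssubset_iff_subset_ne.mpr ⟨setAt_mono g k0, hne⟩)
  have grow : ∀ j : Nat, j ≤ g.length + 1 → j ≤ (SetAt g (1+j)).card := by
    intro j
    induction j with
    | zero => intro _; exact Nat.zero_le _
    | succ j ihj =>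
      intro hj
      have hlt := hstrict (1+j) (by omega) (by omega)
      have hle := ihj (by omega)
      have heq : 1 + j + 1 = 1 + (j+1) := by omega
      rw [heq] at hlt
      omega
  have hcard := grow (g.length + 1) (le_refl _)
  have hle : (SetAt g (1 + (g.length + 1))).card ≤ g.length := by
    have hsubr : SetAt g (1 + (g.length+1)) ⊆ Finset.range g.length := Finset.filter_subset _ _
    have := Finset.card_le_card hsubr
    simpa using this
  omega

theorem safe_bound {g : List (List Int)} {v : Int} (h : Safe g v) :
    SafeAt g (g.length + 2) v := by
  obtain ⟨k, hk⟩ := h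
  obtain ⟨k0, h1, h2, hsub⟩ := exists_collapse g
  have h3 : SafeAt g (k0 + 1 + k) v := safeAt_mono (by omega) hk
  have h4 := collapse h1 hsub k v h3
  exact safeAt_mono (by omega) h4

-- consuming Pre_: a scanned successor is in range while everything before it is safe
theorem inrange_of_done_safe (g : List (List Int)) (hpre : Pre_eventualSafeNodes g)
    {node w : Int} {done ws : List Int}
    (h0 : 0 ≤ node) (h1 : node < (g.length : Int))
    (hsucc : esnSucc g node = done ++ w :: ws)
    (hdone : ∀ x ∈ done, Safe g x) :
    0 ≤ w ∧ w < (g.length : Int) := by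
  by_contra hbad
  have ht : node.toNat < g.length := by omega
  have hrow : g.getD node.toNat [] = done ++ w :: ws := hsucc
  have hjlen : done.length < (g.getD node.toNat []).length := by
    rw [hrow]; simp
  have hjw : (g.getD node.toNat []).getD done.length 0 = w := by
    rw [hrow, List.getD_eq_getElem?_getD, List.getElem?_append_right (le_refl done.length)]
    simp
  obtain ⟨i, hij, hIn, hB⟩ := hpre node.toNat ht done.length hjlen (by rw [hjw]; exact hbad)
  have hilen : i < done.length := hij
  have hid : (g.getD node.toNat []).getD i 0 = done[i] := by
    rw [hrow, List.getD_eq_getElem?_getD, List.getElem?_append_left hilen,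
      List.getElem?_eq_getElem hilen]
    rfl
  have hsafe := hdone _ (List.getElem_mem hilen)
  rw [hid] at hB
  exact absurd (safeAtB_iff.mpr (safe_bound hsafe)) (by rw [hB]; simp)

theorem row_inrange_of_safe (g : List (List Int)) (hpre : Pre_eventualSafeNodes g)
    {v : Int} (h0 : 0 ≤ v) (h1 : v < (g.length : Int))
    (h : ∀ w ∈ esnSucc g v, (0 ≤ w ∧ w < (g.length : Int)) → Safe g w) :
    ∀ w ∈ esnSucc g v, 0 ≤ w ∧ w < (g.length : Int) := by
  intro w hw
  by_contra hbad
  have ht : v.toNat < g.length := by omega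
  obtain ⟨j, hjlen, hjw⟩ := List.getElem_of_mem hw
  have hjw' : (esnSucc g v).getD j 0 = w := by
    rw [List.getD_eq_getElem?_getD, List.getElem?_eq_getElem hjlen]
    simpa using hjw
  obtain ⟨i, hij, hIn, hB⟩ := hpre v.toNat ht j hjlen
    (by rw [show ((g.getD v.toNat []).getD j 0) = (esnSucc g v).getD j 0 from rfl, hjw']; exact hbad)
  have hilen : i < (esnSucc g v).length := by omega
  have himem : (esnSucc g v).getD i 0 ∈ esnSucc g v := by
    rw [List.getD_eq_getElem?_getD, List.getElem?_eq_getElem hilen]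
    exact List.getElem_mem hilen
  have hIn' : 0 ≤ (esnSucc g v).getD i 0 ∧ (esnSucc g v).getD i 0 < (g.length : Int) := hIn
  have hB' : safeAtB g (g.length + 2) ((esnSucc g v).getD i 0) = false := hB
  have hsafe := h _ himem hIn'
  exact absurd (safeAtB_iff.mpr (safe_bound hsafe)) (by rw [hB']; simp)
-- The outNodes dict lookups
theorem outN_fold_get? : ∀ (l : List (List Int)) (s : Int) (d : PySem.Dict Int (List Int)) (v : Int),
    ((PySem.List.enumerate l s).foldl (fun d p => d.insert p.1 p.2) d).get? v
      = if s ≤ v ∧ v < s + l.length then some (l.getD (v - s).toNat []) else d.get? v := by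
  intro l
  induction l with
  | nil =>
    intro s d v
    rw [show PySem.List.enumerate ([] : List (List Int)) s = [] from rfl]
    simp only [List.foldl_nil, List.length_nil]
    rw [if_neg (by push_cast; omega)]
  | cons x t ih =>
    intro s d v
    rw [PySem.List.enumerate_cons]
    simp only [List.foldl_cons]
    rw [ih (s+1) (d.insert s x) v]
    rw [PySem.Dict.get?_insert]
    by_cases hv : v = s
    · subst hv
      simp only [List.length_cons]
      push_cast
      have h1 : ¬ (v + 1 ≤ v ∧ v < v + 1 + t.length) := by omega
      have h2 : v ≤ v ∧ v < v + (t.length + 1) := by constructor <;> omega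
      rw [if_neg h1, if_pos h2]
      simp
    · rw [if_neg hv]
      simp only [List.length_cons]
      push_cast
      by_cases h1 : s + 1 ≤ v ∧ v < s + 1 + t.length
      · have h2 : s ≤ v ∧ v < s + (t.length + 1) := by omega
        rw [if_pos h1, if_pos h2]
        have hk : (v - s).toNat = (v - (s+1)).toNat + 1 := by omega
        rw [hk]
        simp [List.getD]
      · have h2 : ¬ (s ≤ v ∧ v < s + (t.length + 1)) := by
          intro h; exact h1 ⟨by omega, by omega⟩
        rw [if_neg h1, if_neg h2]

theorem outN_get? {g : List (List Int)} {v : Int} (h0 : 0 ≤ v) (h1 : v < (g.length : Int)) :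
    ((PySem.List.enumerate g).foldl (fun d p => d.insert p.1 p.2)
        (PySem.Dict.empty : PySem.Dict Int (List Int))).get? v = some (esnSucc g v) := by
  have : PySem.List.enumerate g = PySem.List.enumerate g 0 := rfl
  rw [this, outN_fold_get? g 0]
  rw [if_pos ⟨h0, by omega⟩]
  simp [esnSucc]

-- Grey nodes: on the current DFS stack (visited but not yet memoized)
def Grey (visited : PySem.Set Int) (memo : PySem.Dict Int Bool) (v : Int) : Prop :=
  v ∈ visited ∧ memo.get? v = none

def MemoOK (g : List (List Int)) (memo : PySem.Dict Int Bool) : Prop :=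
  ∀ v b, memo.get? v = some b → (b = true ↔ Safe g v)

def greyCount (n : Nat) (visited : PySem.Set Int) (memo : PySem.Dict Int Bool) : Nat :=
  (List.range n).countP (fun (i : Nat) => decide (((i : Nat) : Int) ∈ visited ∧ memo.get? ((i : Nat) : Int) = none))

theorem greyCount_le (n : Nat) (visited : PySem.Set Int) (memo : PySem.Dict Int Bool) :
    greyCount n visited memo ≤ n := by
  unfold greyCount
  exact le_trans List.countP_le_length (by simp)

theorem countP_flip {l : List Nat} (hnd : l.Nodup) {i0 : Nat} (hm : i0 ∈ l) {p q : Nat → Bool}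
    (h : ∀ x ∈ l, x ≠ i0 → p x = q x) (hp : p i0 = true) (hq : q i0 = false) :
    l.countP p = l.countP q + 1 := by
  induction l with
  | nil => simp at hm
  | cons a t ih =>
    rcases List.mem_cons.mp hm with rfl | hmt
    · rw [List.countP_cons_of_pos hp, List.countP_cons_of_neg (by simp [hq])]
      have : t.countP p = t.countP q := by
        apply List.countP_congr
        intro x hx
        have hxa : x ≠ i0 := fun he => (List.nodup_cons.mp hnd).1 (he ▸ hx)
        rw [h x (by simp [hx]) hxa]
      omega
    · have ha : a ≠ i0 := fun he => (List.nodup_cons.mp hnd).1 (he ▸ hmt)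
      have hr := ih (List.nodup_cons.mp hnd).2 hmt (fun x hx hne => h x (by simp [hx]) hne)
      by_cases hpa : p a = true
      · rw [List.countP_cons_of_pos hpa, List.countP_cons_of_pos (by rw [← h a (by simp) ha]; exact hpa)]
        omega
      · rw [List.countP_cons_of_neg hpa, List.countP_cons_of_neg (by rw [← h a (by simp) ha]; exact hpa)]
        omega

theorem greyCount_congr {n : Nat} {v1 v2 : PySem.Set Int} {m1 m2 : PySem.Dict Int Bool}
    (h : ∀ v : Int, Grey v1 m1 v ↔ Grey v2 m2 v) : greyCount n v1 m1 = greyCount n v2 m2 := by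
  apply List.countP_congr
  intro x _
  simp only [decide_eq_true_eq]
  exact h (x : Int)

-- all(safe[w] for w in l)
theorem esnAll_iff {safe : List Bool} : ∀ {l : List Int},
    esnAll safe l = true ↔ ∀ w ∈ l, PySem.List.pyGet? safe w = some true := by
  intro l
  induction l with
  | nil => simp [esnAll]
  | cons w ws ih =>
    simp only [esnAll]
    cases hg : PySem.List.pyGet? safe w with
    | none => simp [hg]
    | some b =>
      simp only [Bool.and_eq_true, ih]
      constructor
      · rintro ⟨rfl, h⟩ x hx
        rcases List.mem_cons.mp hx with rfl | hx
        · exact hg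
        · exact h x hx
      · intro h
        refine ⟨?_, fun x hx => h x (by simp [hx])⟩
        have := h w (by simp)
        rw [hg] at this
        exact (Option.some.injEq _ _).mp this

-- getD after set
theorem getD_set_bool : ∀ (l : List Bool) (i j : Nat) (a : Bool), (l.set i a).getD j false = if j = i ∧ i < l.length then a else l.getD j false := by
  intro l
  induction l with
  | nil => intro i j a; simp
  | cons x t ih =>
    intro i j a
    cases i with
    | zero =>
      cases j <;> simp [List.set]
    | succ i =>
      cases j with
      | zero => simp [List.set]
      | succ j =>
        simp only [List.set, List.getD_cons_succ, List.length_cons, ih i j a]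
        by_cases h : j = i ∧ i < t.length
        · rw [if_pos h, if_pos ⟨by omega, by omega⟩]
        · rw [if_neg h, if_neg (by omega)]

theorem countP_set_true : ∀ (l : List Bool) (i : Nat), i < l.length → l.getD i false = false →
    (l.set i true).countP (fun b => b) = l.countP (fun b => b) + 1 := by
  intro l
  induction l with
  | nil => intro i hi _; simp at hi
  | cons x t ih =>
    intro i hi hf
    cases i with
    | zero =>
      simp only [List.getD_cons_zero] at hf
      subst hf
      simp [List.set]
    | succ i =>
      simp only [List.getD_cons_succ] at hf
      simp only [List.set, List.countP_cons, ih i (by simpa using hi) hf]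
      omega
-- Specification of the DFS helper, by induction on fuel
def HelperSpec (g : List (List Int)) (outN : PySem.Dict Int (List Int)) (fuel : Nat) : Prop :=
  ∀ (node : Int) (visited : PySem.Set Int) (memo : PySem.Dict Int Bool),
    0 ≤ node → node < (g.length : Int) →
    MemoOK g memo →
    (∀ v, Grey visited memo v → 0 ≤ v ∧ v < (g.length : Int)) →
    (∀ v, Grey visited memo v → Relation.TransGen (EsnStep g) v node) →
    g.length < fuel + greyCount g.length visited memo →
    ∃ b visited' memo',
      esnHelper outN fuel node visited memo = some (b, visited', memo') ∧
      MemoOK g memo' ∧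
      (∀ v bv, memo.get? v = some bv → memo'.get? v = some bv) ∧
      (∀ v, Grey visited' memo' v ↔ Grey visited memo v) ∧
      (b = true ↔ Safe g node)

theorem grey_insert_iff {visited : PySem.Set Int} {memo : PySem.Dict Int Bool} {node : Int} {c : Bool}
    (_hmn : memo.get? node = none) :
    ∀ v, Grey visited (memo.insert node c) v ↔ (Grey visited memo v ∧ v ≠ node) := by
  intro v
  constructor
  · rintro ⟨hvv, hvm⟩
    rw [PySem.Dict.get?_insert] at hvm
    by_cases hvn : v = node
    · rw [if_pos hvn] at hvm; cases hvm
    · rw [if_neg hvn] at hvm; exact ⟨⟨hvv, hvm⟩, hvn⟩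
  · rintro ⟨⟨hvv, hvm⟩, hvn⟩
    exact ⟨hvv, by rw [PySem.Dict.get?_insert, if_neg hvn]; exact hvm⟩

theorem esnLoop_spec (g : List (List Int)) (outN : PySem.Dict Int (List Int))
    (hpre : Pre_eventualSafeNodes g) (fuel : Nat) (IH : HelperSpec g outN fuel) :
    ∀ (ws done : List Int) (node : Int) (visited : PySem.Set Int) (memo : PySem.Dict Int Bool),
    esnSucc g node = done ++ ws →
    (∀ w ∈ done, Safe g w) →
    0 ≤ node → node < (g.length : Int) →
    MemoOK g memo →
    (∀ v, Grey visited memo v → 0 ≤ v ∧ v < (g.length : Int)) →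
    (∀ v, Grey visited memo v → Relation.ReflTransGen (EsnStep g) v node) →
    Grey visited memo node →
    g.length < fuel + greyCount g.length visited memo →
    ∃ b visited' memo',
      esnLoop outN fuel node ws visited memo = some (b, visited', memo') ∧
      MemoOK g memo' ∧
      (∀ v bv, memo.get? v = some bv → memo'.get? v = some bv) ∧
      (∀ v, Grey visited' memo' v ↔ (Grey visited memo v ∧ v ≠ node)) ∧
      (b = true ↔ Safe g node) := by
  intro ws
  induction ws with
  | nil =>
    intro done node visited memo hsucc hdone h0 h1 hM hGR hGreach hGnode hfuel
    have hsafe : Safe g node := safe_of_forall_succ (by rw [hsucc]; simpa using hdone)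
    refine ⟨true, visited, memo.insert node true, by simp [esnLoop], ?_, ?_, grey_insert_iff hGnode.2, ⟨fun _ => hsafe, fun _ => rfl⟩⟩
    · intro v b hv
      rw [PySem.Dict.get?_insert] at hv
      by_cases hvn : v = node
      · subst hvn; rw [if_pos rfl] at hv
        cases hv; simpa using hsafe
      · rw [if_neg hvn] at hv; exact hM v b hv
    · intro v bv hv
      rw [PySem.Dict.get?_insert, if_neg ?_]
      · exact hv
      · rintro rfl; rw [hGnode.2] at hv; cases hv
  | cons w ws ihw =>
    intro done node visited memo hsucc hdone h0 h1 hM hGR hGreach hGnode hfuel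
    have hwmem : w ∈ esnSucc g node := by rw [hsucc]; simp
    obtain ⟨hw0, hw1⟩ := inrange_of_done_safe g hpre h0 h1 hsucc hdone
    obtain ⟨b, v', m', heq, hM', hmono', hgrey', hbiff⟩ :=
      IH w visited memo hw0 hw1 hM hGR
        (fun v hv => Relation.TransGen.tail' (hGreach v hv) hwmem) hfuel
    have hGnode' : Grey v' m' node := (hgrey' node).mpr hGnode
    cases b with
    | true =>
      have hsafew : Safe g w := hbiff.mp rfl
      obtain ⟨b2, v2, m2, heq2, hM2, hmono2, hgrey2, hbiff2⟩ :=
        ihw (done ++ [w]) node v' m' (by rw [hsucc, List.append_assoc]; rfl)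
          (by intro x hx; rcases List.mem_append.mp hx with hx | hx
              · exact hdone x hx
              · simp at hx; exact hx ▸ hsafew)
          h0 h1 hM'
          (fun v hv => hGR v ((hgrey' v).mp hv))
          (fun v hv => hGreach v ((hgrey' v).mp hv))
          hGnode'
          (by rw [greyCount_congr hgrey']; exact hfuel)
      refine ⟨b2, v2, m2, ?_, hM2, fun v bv hv => hmono2 v bv (hmono' v bv hv), ?_, hbiff2⟩
      · simp only [esnLoop]
        rw [heq]
        simpa using heq2
      · intro v
        rw [hgrey2 v]
        exact and_congr_left (fun _ => hgrey' v)
    | false =>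
      have hnsafew : ¬ Safe g w := fun hs => by simpa using hbiff.mpr hs
      have hnsafe : ¬ Safe g node := fun hs => hnsafew (safe_succ hs hwmem)
      refine ⟨false, v', m'.insert node false, ?_, ?_, ?_, ?_, by simp [hnsafe]⟩
      · simp only [esnLoop]
        rw [heq]
        simp
      · intro v b hv
        rw [PySem.Dict.get?_insert] at hv
        by_cases hvn : v = node
        · subst hvn; rw [if_pos rfl] at hv
          cases hv; simpa using hnsafe
        · rw [if_neg hvn] at hv; exact hM' v b hv
      · intro v bv hv
        rw [PySem.Dict.get?_insert, if_neg ?_]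
        · exact hmono' v bv hv
        · rintro rfl; rw [hGnode.2] at hv; cases hv
      · intro v
        rw [grey_insert_iff hGnode'.2 v]
        exact and_congr_left (fun _ => hgrey' v)

theorem esnHelper_spec (g : List (List Int)) (outN : PySem.Dict Int (List Int))
    (houtN : ∀ v : Int, 0 ≤ v → v < (g.length : Int) → outN.get? v = some (esnSucc g v))
    (hpre : Pre_eventualSafeNodes g) : ∀ fuel, HelperSpec g outN fuel := by
  intro fuel
  induction fuel with
  | zero =>
    intro node visited memo h0 h1 hM hGR hGreach hfuel
    exact absurd hfuel (by have := greyCount_le g.length visited memo; omega)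
  | succ fuel ih =>
    intro node visited memo h0 h1 hM hGR hGreach hfuel
    cases hmn : memo.get? node with
    | some b =>
      exact ⟨b, visited, memo, by simp [esnHelper, hmn], hM, fun v bv h => h, fun v => Iff.rfl, hM node b hmn⟩
    | none =>
      by_cases hvis : PySem.Set.contains visited node = true
      · have hGnode : Grey visited memo node := ⟨(PySem.Set.contains_iff _ _).mp hvis, hmn⟩
        have hnsafe : ¬ Safe g node := not_safe_of_cycle (hGreach node hGnode)
        exact ⟨false, visited, memo,
          by simp [esnHelper, hmn, (PySem.Set.contains_iff _ _).mp hvis], hM, fun v bv h => h,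
          fun v => Iff.rfl, by simp [hnsafe]⟩
      · have hnvis : node ∉ visited := fun h => hvis ((PySem.Set.contains_iff _ _).mpr h)
        have hout := houtN node h0 h1
        have hgrey_add : ∀ v, Grey (PySem.Set.add visited node) memo v ↔ (Grey visited memo v ∨ v = node) := by
          intro v
          constructor
          · rintro ⟨hvv, hvm⟩
            rcases (PySem.Set.mem_add _ _ _).mp hvv with hvv | rfl
            · exact Or.inl ⟨hvv, hvm⟩
            · exact Or.inr rfl
          · rintro (⟨hvv, hvm⟩ | rfl)
            · exact ⟨(PySem.Set.mem_add _ _ _).mpr (Or.inl hvv), hvm⟩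
            · exact ⟨(PySem.Set.mem_add _ _ _).mpr (Or.inr rfl), hmn⟩
        have hgc : greyCount g.length (PySem.Set.add visited node) memo
            = greyCount g.length visited memo + 1 := by
          unfold greyCount
          refine countP_flip (l := List.range g.length) (List.nodup_range) (i0 := node.toNat) (by simp only [List.mem_range]; omega) ?_ ?_ ?_
          · intro x _ hx
            simp only [decide_eq_decide]
            have : (x : Int) ≠ node := by omega
            rw [show ((x : Int) ∈ PySem.Set.add visited node ∧ memo.get? (x : Int) = none)
                  ↔ Grey (PySem.Set.add visited node) memo (x : Int) from Iff.rfl]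
            rw [hgrey_add]
            simp only [Grey]
            constructor
            · rintro (h | h)
              · exact h
              · exact absurd h this
            · exact Or.inl
          · simp only [decide_eq_true_eq]
            have : ((node.toNat : Nat) : Int) = node := by omega
            rw [this]
            exact ⟨(PySem.Set.mem_add _ _ _).mpr (Or.inr rfl), hmn⟩
          · simp only [decide_eq_false_iff_not]
            have : ((node.toNat : Nat) : Int) = node := by omega
            rw [this]
            rintro ⟨h, _⟩
            exact hnvis h
        by_cases hEmpty : (esnSucc g node).isEmpty
        · have hnil : esnSucc g node = [] := List.isEmpty_iff.mp hEmpty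
          have hsafe : Safe g node := ⟨1, by intro w hw; rw [hnil] at hw; cases hw⟩
          refine ⟨true, PySem.Set.add visited node, memo.insert node true,
            by simp [esnHelper, hmn, hnvis, hout, hEmpty], ?_, ?_, ?_, ⟨fun _ => hsafe, fun _ => rfl⟩⟩
          · intro v b hv
            rw [PySem.Dict.get?_insert] at hv
            by_cases hvn : v = node
            · subst hvn; rw [if_pos rfl] at hv; cases hv; simpa using hsafe
            · rw [if_neg hvn] at hv; exact hM v b hv
          · intro v bv hv
            rw [PySem.Dict.get?_insert, if_neg ?_]
            · exact hv
            · rintro rfl; rw [hmn] at hv; cases hv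
          · intro v
            rw [grey_insert_iff hmn v, hgrey_add v]
            constructor
            · rintro ⟨h | rfl, hvn⟩
              · exact h
              · exact absurd rfl hvn
            · intro h
              refine ⟨Or.inl h, ?_⟩
              rintro rfl
              exact hnvis h.1
        · obtain ⟨b, v', m', heq, hM', hmono', hgrey', hbiff⟩ :=
            esnLoop_spec g outN hpre fuel ih (esnSucc g node) [] node
              (PySem.Set.add visited node) memo rfl (by simp) h0 h1 hM
              (by intro v hv
                  rcases (hgrey_add v).mp hv with h | rfl
                  · exact hGR v h
                  · exact ⟨h0, h1⟩)
              (by intro v hv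
                  rcases (hgrey_add v).mp hv with h | rfl
                  · exact (hGreach v h).to_reflTransGen
                  · exact Relation.ReflTransGen.refl)
              ((hgrey_add node).mpr (Or.inr rfl))
              (by rw [hgc]; omega)
          refine ⟨b, v', m', ?_, hM', hmono', ?_, hbiff⟩
          · have hne : esnSucc g node ≠ [] := fun h => hEmpty (by simp [h])
            have hadd : PySem.Set.add visited node = visited ++ [node] :=
              PySem.Set.add_of_not_mem hnvis
            simp [esnHelper, hmn, hnvis, hout, hne]
            rw [← hadd]
            exact heq
          · intro v
            rw [hgrey' v, hgrey_add v]
            constructor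
            · rintro ⟨h | rfl, hvn⟩
              · exact h
              · exact absurd rfl hvn
            · intro h
              refine ⟨Or.inl h, ?_⟩
              rintro rfl
              exact hnvis h.1
-- Top-level fold of port A: collects exactly the safe indices
theorem a_fold_spec (g : List (List Int)) (outN : PySem.Dict Int (List Int))
    (houtN : ∀ v : Int, 0 ≤ v → v < (g.length : Int) → outN.get? v = some (esnSucc g v))
    (hpre : Pre_eventualSafeNodes g) (φ : Int → Bool)
    (hφ : ∀ v : Int, 0 ≤ v → v < (g.length : Int) → (φ v = true ↔ Safe g v)) :
    ∀ (l : List Int) (acc : List Int) (memo : PySem.Dict Int Bool),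
    (∀ v ∈ l, 0 ≤ v ∧ v < (g.length : Int)) →
    MemoOK g memo →
    (l.foldl (fun (st : List Int × PySem.Dict Int Bool) i =>
        match esnHelper outN (g.length + 1) i PySem.Set.empty st.2 with
        | none => st
        | some (b, _, memo') => (if b then st.1 ++ [i] else st.1, memo')) (acc, memo)).1
      = acc ++ l.filter φ := by
  intro l
  induction l with
  | nil => intro acc memo _ _; simp
  | cons v l ihl =>
    intro acc memo hb hM
    obtain ⟨h0, h1⟩ := hb v (by simp)
    have hGR : ∀ x : Int, Grey PySem.Set.empty memo x → 0 ≤ x ∧ x < (g.length : Int) := by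
      rintro x ⟨hx, -⟩; cases hx
    have hGreach : ∀ x : Int, Grey PySem.Set.empty memo x → Relation.TransGen (EsnStep g) x v := by
      rintro x ⟨hx, -⟩; cases hx
    have hgc : greyCount g.length PySem.Set.empty memo = 0 := by
      unfold greyCount
      rw [List.countP_eq_zero]
      rintro a -
      simp only [decide_eq_true_eq]
      rintro ⟨hx, -⟩; cases hx
    obtain ⟨b, v', m', heq, hM', _, _, hbiff⟩ :=
      esnHelper_spec g outN houtN hpre (g.length + 1) v PySem.Set.empty memo h0 h1 hM hGR hGreach
        (by rw [hgc]; omega)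
    have hbφ : b = φ v := by
      have h2 := hφ v h0 h1
      cases b <;> cases hcφ : φ v
      · rfl
      · exact absurd (h2.mp hcφ) (fun hs => by simpa using hbiff.mpr hs)
      · exact absurd (hbiff.mp rfl) (fun hs => by simpa [hcφ] using h2.mpr hs)
      · rfl
    simp only [List.foldl_cons]
    rw [heq]
    simp only []
    rw [ihl _ _ (fun x hx => hb x (by simp [hx])) hM']
    rw [List.filter_cons, hbφ]
    cases φ v
    · simp
    · simp
-- B side: pyGetD on a nonnegative index is getD at toNat
theorem pyGetD_getD {α : Type} (d : α) (s : List α) (v : Int) (h0 : 0 ≤ v) :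
    PySem.List.pyGetD s v d = s.getD v.toNat d := by
  by_cases h1 : v.toNat < s.length
  · rw [PySem.List.pyGetD_eq_getElem s d h0 (by omega)]
    rw [List.getD_eq_getElem?_getD, List.getElem?_eq_getElem h1]
    rfl
  · rw [PySem.List.pyGetD_of_none s v d ?hnone, List.getD_eq_getElem?_getD, List.getElem?_eq_none (by omega)]
    · rfl
    case hnone =>
      rw [PySem.List.pyGet?_eq_none_iff]
      intro hr
      obtain ⟨hr1, hr2⟩ := hr
      omega

theorem pyGetD_succ {g : List (List Int)} {v : Int} (h0 : 0 ≤ v) :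
    PySem.List.pyGetD g v [] = esnSucc g v := pyGetD_getD [] g v h0

def trueCount (s : List Bool) : Nat := s.countP (fun b => b)

theorem trueCount_le (s : List Bool) : trueCount s ≤ s.length := List.countP_le_length

-- one sweep of port B, over an arbitrary node list
theorem sweep_fold (g : List (List Int)) (hpre : Pre_eventualSafeNodes g) :
    ∀ (l : List Int) (safe : List Bool) (c : Bool),
    (∀ v ∈ l, 0 ≤ v ∧ v < (g.length : Int)) →
    safe.length = g.length →
    (l.foldl (fun (st : List Bool × Bool) v =>
        if PySem.List.pyGetD st.1 v false = false ∧ esnAll st.1 (PySem.List.pyGetD g v []) = true then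
          (PySem.List.pySetD st.1 v true, true)
        else st) (safe, c)).1.length = g.length ∧
    (∀ j : Nat, safe.getD j false = true →
      (l.foldl (fun (st : List Bool × Bool) v =>
        if PySem.List.pyGetD st.1 v false = false ∧ esnAll st.1 (PySem.List.pyGetD g v []) = true then
          (PySem.List.pySetD st.1 v true, true)
        else st) (safe, c)).1.getD j false = true) ∧
    ((∀ j : Nat, j < g.length → safe.getD j false = true → Safe g (j : Int)) →
      (∀ j : Nat, j < g.length →
        (l.foldl (fun (st : List Bool × Bool) v =>
          if PySem.List.pyGetD st.1 v false = false ∧ esnAll st.1 (PySem.List.pyGetD g v []) = true then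
            (PySem.List.pySetD st.1 v true, true)
          else st) (safe, c)).1.getD j false = true → Safe g (j : Int))) ∧
    (c = true → (l.foldl (fun (st : List Bool × Bool) v =>
        if PySem.List.pyGetD st.1 v false = false ∧ esnAll st.1 (PySem.List.pyGetD g v []) = true then
          (PySem.List.pySetD st.1 v true, true)
        else st) (safe, c)).2 = true) ∧
    ((l.foldl (fun (st : List Bool × Bool) v =>
        if PySem.List.pyGetD st.1 v false = false ∧ esnAll st.1 (PySem.List.pyGetD g v []) = true then
          (PySem.List.pySetD st.1 v true, true)
        else st) (safe, c)).2 = false →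
      (c = false ∧
       (l.foldl (fun (st : List Bool × Bool) v =>
        if PySem.List.pyGetD st.1 v false = false ∧ esnAll st.1 (PySem.List.pyGetD g v []) = true then
          (PySem.List.pySetD st.1 v true, true)
        else st) (safe, c)).1 = safe ∧
       ∀ v ∈ l, ¬(PySem.List.pyGetD safe v false = false ∧ esnAll safe (esnSucc g v) = true))) ∧
    (trueCount safe ≤ trueCount (l.foldl (fun (st : List Bool × Bool) v =>
        if PySem.List.pyGetD st.1 v false = false ∧ esnAll st.1 (PySem.List.pyGetD g v []) = true then
          (PySem.List.pySetD st.1 v true, true)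
        else st) (safe, c)).1) ∧
    ((l.foldl (fun (st : List Bool × Bool) v =>
        if PySem.List.pyGetD st.1 v false = false ∧ esnAll st.1 (PySem.List.pyGetD g v []) = true then
          (PySem.List.pySetD st.1 v true, true)
        else st) (safe, c)).2 = true →
      (c = true ∨ trueCount safe < trueCount (l.foldl (fun (st : List Bool × Bool) v =>
        if PySem.List.pyGetD st.1 v false = false ∧ esnAll st.1 (PySem.List.pyGetD g v []) = true then
          (PySem.List.pySetD st.1 v true, true)
        else st) (safe, c)).1)) := by
  intro l
  induction l with
  | nil =>
    intro safe c _ hlen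
    refine ⟨hlen, fun j h => h, fun hs => hs, fun h => h, ?_, le_refl _, fun h => Or.inl h⟩
    intro hc
    exact ⟨hc, rfl, by simp⟩
  | cons v l ihl =>
    intro safe c hb hlen
    obtain ⟨h0, h1⟩ := hb v (by simp)
    have hvn : v.toNat < safe.length := by omega
    simp only [List.foldl_cons]
    by_cases hc : PySem.List.pyGetD safe v false = false ∧ esnAll safe (PySem.List.pyGetD g v []) = true
    · -- the update fires
      have hset : PySem.List.pySetD safe v true = safe.set v.toNat true :=
        PySem.List.pySetD_of_nonneg safe true h0
      rw [if_pos hc, hset]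
      have hlen' : (safe.set v.toNat true).length = g.length := by simpa using hlen
      obtain ⟨ih1, ih2, ih3, ih4, ih5, ih6, ih7⟩ :=
        ihl (safe.set v.toNat true) true (fun x hx => hb x (by simp [hx])) hlen'
      have hmon : ∀ j : Nat, safe.getD j false = true → (safe.set v.toNat true).getD j false = true := by
        intro j hj
        rw [getD_set_bool]
        by_cases h : j = v.toNat ∧ v.toNat < safe.length
        · rw [if_pos h]
        · rw [if_neg h]; exact hj
      have hsafe_v : (∀ j : Nat, j < g.length → safe.getD j false = true → Safe g (j : Int)) → Safe g v := by
        intro hsound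
        have hget : ∀ w ∈ esnSucc g v, PySem.List.pyGet? safe w = some true :=
          esnAll_iff.mp (by rw [pyGetD_succ h0] at hc; exact hc.2)
        have hmarked : ∀ w ∈ esnSucc g v, (0 ≤ w ∧ w < (g.length : Int)) → Safe g w := by
          intro w hw hr
          have hall := hget w hw
          have hwn : w.toNat < safe.length := by omega
          rw [PySem.List.pyGet?_eq_some_getElem safe hr.1 (by omega)] at hall
          have hgd : safe.getD w.toNat false = true := by
            rw [List.getD_eq_getElem?_getD, List.getElem?_eq_getElem hwn]
            simpa using hall
          have hsnd := hsound w.toNat (by omega) hgd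
          have hww : ((w.toNat : Nat) : Int) = w := by omega
          rwa [hww] at hsnd
        have hrow := row_inrange_of_safe g hpre h0 h1 hmarked
        exact safe_of_forall_succ (fun w hw => hmarked w hw (hrow w hw))
      have hcount : trueCount (safe.set v.toNat true) = trueCount safe + 1 := by
        unfold trueCount
        exact countP_set_true safe v.toNat hvn (by rw [← pyGetD_getD false safe v h0]; exact hc.1)
      refine ⟨ih1, fun j hj => ih2 j (hmon j hj), ?_, fun _ => ih4 rfl, ?_, by omega, ?_⟩
      · intro hsound
        apply ih3
        intro j hj hjt
        rw [getD_set_bool] at hjt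
        by_cases h : j = v.toNat ∧ v.toNat < safe.length
        · have hvv : ((j : Nat) : Int) = v := by omega
          rw [hvv]
          exact hsafe_v hsound
        · rw [if_neg h] at hjt
          exact hsound j hj hjt
      · intro hfalse
        exact absurd (ih4 rfl) (by rw [hfalse]; simp)
      · intro _
        right
        omega
    · rw [if_neg hc]
      obtain ⟨ih1, ih2, ih3, ih4, ih5, ih6, ih7⟩ := ihl safe c (fun x hx => hb x (by simp [hx])) hlen
      refine ⟨ih1, ih2, ih3, ih4, ?_, ih6, ih7⟩
      intro hfalse
      obtain ⟨hc', hsame, hrest⟩ := ih5 hfalse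
      refine ⟨hc', hsame, ?_⟩
      intro x hx
      rcases List.mem_cons.mp hx with rfl | hx
      · rw [← pyGetD_succ h0]; exact hc
      · exact hrest x hx
-- one-sweep corollary in terms of esnSweep
theorem sweep_spec (g : List (List Int)) (hpre : Pre_eventualSafeNodes g)
    (safe : List Bool) (hlen : safe.length = g.length) :
    (esnSweep g g.length safe).1.length = g.length ∧
    (∀ j : Nat, safe.getD j false = true → (esnSweep g g.length safe).1.getD j false = true) ∧
    ((∀ j : Nat, j < g.length → safe.getD j false = true → Safe g (j : Int)) →
      (∀ j : Nat, j < g.length → (esnSweep g g.length safe).1.getD j false = true → Safe g (j : Int))) ∧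
    ((esnSweep g g.length safe).2 = false →
      ((esnSweep g g.length safe).1 = safe ∧
       ∀ v ∈ PySem.List.pyRange 0 (g.length : Int) 1,
         ¬(PySem.List.pyGetD safe v false = false ∧ esnAll safe (esnSucc g v) = true))) ∧
    ((esnSweep g g.length safe).2 = true →
      trueCount safe < trueCount (esnSweep g g.length safe).1) := by
  have hb : ∀ v ∈ PySem.List.pyRange 0 (g.length : Int) 1, 0 ≤ v ∧ v < (g.length : Int) := by
    intro v hv
    have := (PySem.List.mem_pyRange_one).mp hv
    omega
  obtain ⟨s1, s2, s3, s4, s5, s6, s7⟩ :=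
    sweep_fold g hpre (PySem.List.pyRange 0 (g.length : Int) 1) safe false hb hlen
  refine ⟨s1, s2, s3, fun h => ⟨(s5 h).2.1, (s5 h).2.2⟩, fun h => ?_⟩
  rcases s7 h with hc | hlt
  · cases hc
  · exact hlt

theorem iter_spec (g : List (List Int)) (hpre : Pre_eventualSafeNodes g) :
    ∀ (f : Nat) (safe : List Bool),
    safe.length = g.length →
    (∀ j : Nat, j < g.length → safe.getD j false = true → Safe g (j : Int)) →
    g.length < f + trueCount safe →
    (esnIter g g.length f safe).length = g.length ∧
    (∀ j : Nat, j < g.length → (esnIter g g.length f safe).getD j false = true → Safe g (j : Int)) ∧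
    (∀ v : Int, 0 ≤ v → v < (g.length : Int) →
      ¬(PySem.List.pyGetD (esnIter g g.length f safe) v false = false ∧
        esnAll (esnIter g g.length f safe) (esnSucc g v) = true)) := by
  intro f
  induction f with
  | zero =>
    intro safe hlen _ hfuel
    have h1 := trueCount_le safe
    exact absurd hfuel (by omega)
  | succ f ihf =>
    intro safe hlen hsound hfuel
    obtain ⟨s1, s2, s3, s5, s7⟩ := sweep_spec g hpre safe hlen
    cases hch : (esnSweep g g.length safe).2 with
    | false =>
      obtain ⟨hsame, hfix⟩ := s5 hch
      have hres : esnIter g g.length (f+1) safe = safe := by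
        simp only [esnIter]
        rw [hch]
        simp [hsame]
      rw [hres]
      refine ⟨hlen, hsound, ?_⟩
      intro v h0 h1
      exact hfix v ((PySem.List.mem_pyRange_one).mpr ⟨h0, h1⟩)
    | true =>
      have hres : esnIter g g.length (f+1) safe = esnIter g g.length f (esnSweep g g.length safe).1 := by
        simp only [esnIter]
        rw [hch]
        simp
      rw [hres]
      refine ihf (esnSweep g g.length safe).1 s1 (s3 hsound) ?_
      have := s7 hch
      omega

theorem complete_spec (g : List (List Int)) (hpre : Pre_eventualSafeNodes g) (R : List Bool)
    (hlen : R.length = g.length)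
    (hfix : ∀ v : Int, 0 ≤ v → v < (g.length : Int) →
      ¬(PySem.List.pyGetD R v false = false ∧ esnAll R (esnSucc g v) = true)) :
    ∀ (k : Nat) (v : Int), 0 ≤ v → v < (g.length : Int) → SafeAt g k v →
      R.getD v.toNat false = true := by
  intro k
  induction k with
  | zero => intro v _ _ h; exact h.elim
  | succ k ihk =>
    intro v h0 h1 hs
    have hrow : ∀ w ∈ esnSucc g v, 0 ≤ w ∧ w < (g.length : Int) :=
      row_inrange_of_safe g hpre h0 h1 (fun w hw _ => ⟨k, hs w hw⟩)
    have hall : esnAll R (esnSucc g v) = true := by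
      rw [esnAll_iff]
      intro w hw
      obtain ⟨hw0, hw1⟩ := hrow w hw
      have ht := ihk w hw0 hw1 (hs w hw)
      rw [PySem.List.pyGet?_eq_some_getElem R hw0 (by omega)]
      have hgd : R.getD w.toNat false = R[w.toNat] := by
        rw [List.getD_eq_getElem?_getD, List.getElem?_eq_getElem (by omega)]
        rfl
      rw [hgd] at ht
      rw [ht]
    have hnf := hfix v h0 h1
    rw [pyGetD_getD false R v h0] at hnf
    cases hgd : R.getD v.toNat false
    · exact absurd ⟨hgd, hall⟩ hnf
    · rfl
-- ===== VERDICT (by name: the statement is the Claim_ definition above) =====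
theorem eventualSafeNodes_spec : Claim_equal_eventualSafeNodes := by
  intro g _ hpre
  unfold Spec_eventualSafeNodes
  have houtN : ∀ v : Int, 0 ≤ v → v < (g.length : Int) →
      (((PySem.List.enumerate g).foldl (fun d p => d.insert p.1 p.2)
        (PySem.Dict.empty : PySem.Dict Int (List Int)))).get? v = some (esnSucc g v) :=
    fun v h0 h1 => outN_get? h0 h1
  have hrep_len : (List.replicate g.length false).length = g.length := by simp
  have hrep_sound : ∀ j : Nat, j < g.length →
      (List.replicate g.length false).getD j false = true → Safe g (j : Int) := by
    intro j hj h
    rw [List.getD_eq_getElem?_getD, List.getElem?_replicate, if_pos hj] at h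
    cases h
  have hrep_count : trueCount (List.replicate g.length false) = 0 := by
    unfold trueCount
    rw [List.countP_eq_zero]
    intro a ha
    simp [List.eq_of_mem_replicate ha]
  obtain ⟨hSlen, hSsound, hSfix⟩ :=
    iter_spec g hpre (g.length + 1) (List.replicate g.length false) hrep_len hrep_sound
      (by rw [hrep_count]; omega)
  set S := esnIter g g.length (g.length + 1) (List.replicate g.length false) with hS
  have hφ : ∀ v : Int, 0 ≤ v → v < (g.length : Int) →
      ((PySem.List.pyGetD S v false) = true ↔ Safe g v) := by
    intro v h0 h1
    rw [pyGetD_getD false S v h0]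
    constructor
    · intro h
      have hres := hSsound v.toNat (by omega) h
      rwa [show ((v.toNat : Nat) : Int) = v by omega] at hres
    · rintro ⟨k, hk⟩
      exact complete_spec g hpre S hSlen hSfix k v h0 h1 hk
  have hA : eventualSafeNodes g =
      PySem.List.sorted ((PySem.List.pyRange 0 (g.length : Int) 1).filter
        (fun v => PySem.List.pyGetD S v false)) (fun x => x) false := by
    simp only [eventualSafeNodes]
    congr 1
    have := a_fold_spec g _ houtN hpre (fun v => PySem.List.pyGetD S v false) hφ
      (PySem.List.pyRange 0 (g.length : Int) 1) [] PySem.Dict.empty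
      (fun v hv => by have := (PySem.List.mem_pyRange_one).mp hv; omega)
      (by intro v b h; rw [PySem.Dict.get?_empty] at h; cases h)
    simpa using this
  have hsorted : PySem.List.sorted ((PySem.List.pyRange 0 (g.length : Int) 1).filter
        (fun v => PySem.List.pyGetD S v false)) (fun x => x) false
      = (PySem.List.pyRange 0 (g.length : Int) 1).filter (fun v => PySem.List.pyGetD S v false) := by
    apply PySem.List.sorted_eq_self_of_pairwise
    exact ((PySem.List.pairwise_lt_pyRange_one _ _).filter _).imp le_of_lt
  have hB : eventualSafeNodes_alt g
      = (PySem.List.pyRange 0 (g.length : Int) 1).filter (fun v => PySem.List.pyGetD S v false) := by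
    simp only [eventualSafeNodes_alt]
    rw [← hS]
    have := PySem.List.foldl_append_if_eq_filter (fun v => PySem.List.pyGetD S v false)
      (l := PySem.List.pyRange 0 (g.length : Int) 1) (acc := ([] : List Int))
    simpa using this
  rw [hA, hsorted, hB]
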